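-- pv_equiv track=rewrite | github.com/ethyca/fides | src/fides/service/pbac/policies/evaluate.py | _matches_dimension
-- ===== SOURCE A (Python) =====
-- from typing import Any
--
-- def _matches_dimension(dim: dict[str, Any], request_values: list[str]) -> bool:
--     """Check if request values satisfy a match dimension's any/all operators."""
--     any_values = dim.get("any", [])
--     if any_values:
--         if not any(_taxonomy_matches_any(mv, request_values) for mv in any_values):
--             return False
--
--     all_values = dim.get("all", [])
--     if all_values:
--         if not all(_taxonomy_matches_any(mv, request_values) for mv in all_values):
--             return False
--
--     return True
--
-- def _taxonomy_matches_any(match_key: str, request_values: list[str]) -> bool: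
--     return any(_taxonomy_match(match_key, rv) for rv in request_values)
--
-- def _taxonomy_match(match_key: str, request_value: str) -> bool:
--     """Taxonomy prefix match with dot boundary guard.
--
--     Empty match_key never matches — prevents accidental catch-all.
--     """
--     if not match_key:
--         return False
--     if match_key == request_value:
--         return True
--     return request_value.startswith(match_key + ".")
-- ===== SOURCE B (Python) =====
-- def _matches_dimension(dim, request_values):
--     """Check if request values satisfy a match dimension's any/all operators.
--
--     Builds the set of all matchable keys (each request value and each of
--     its dot-boundary prefixes) once, so each match key is one set lookup.
--     """
--     matchable = set()
--     for rv in request_values: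
--         matchable.add(rv)
--         for i, ch in enumerate(rv):
--             if ch == '.':
--                 matchable.add(rv[:i])
--
--     def _ok(mk):
--         return bool(mk) and mk in matchable
--
--     any_values = dim.get("any", [])
--     if any_values:
--         if not any(_ok(mv) for mv in any_values):
--             return False
--
--     all_values = dim.get("all", [])
--     if all_values:
--         if not all(_ok(mv) for mv in all_values):
--             return False
--
--     return True
-- ===== Notes on version B (the rewrite author's own statement) =====
-- stated objective: alternative
-- what changed: Instead of testing every match key against every request value with a prefix check (A), B builds once the set of all dot-boundary prefixes of the request values and answers each match key by a single set membership lookup; it trades A's early short-circuiting for a precomputed index.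
import Mathlib
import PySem

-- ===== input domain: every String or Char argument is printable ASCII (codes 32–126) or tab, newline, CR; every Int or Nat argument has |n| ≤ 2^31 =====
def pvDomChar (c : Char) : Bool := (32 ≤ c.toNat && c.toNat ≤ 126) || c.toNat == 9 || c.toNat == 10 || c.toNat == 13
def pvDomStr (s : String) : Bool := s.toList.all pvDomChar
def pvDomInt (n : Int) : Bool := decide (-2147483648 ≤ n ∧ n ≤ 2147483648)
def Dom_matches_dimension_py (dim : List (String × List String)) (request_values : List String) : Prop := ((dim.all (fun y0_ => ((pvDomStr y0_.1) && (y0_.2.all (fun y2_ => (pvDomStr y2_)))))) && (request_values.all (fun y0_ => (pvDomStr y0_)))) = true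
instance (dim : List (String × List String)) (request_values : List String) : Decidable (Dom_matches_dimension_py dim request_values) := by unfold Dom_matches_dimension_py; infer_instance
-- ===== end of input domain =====

-- B replaces A's nested per-key scan of the request values by one precomputed
-- set of all dot-boundary prefixes, answering each match key with one lookup (objective: alternative).

-- ===== PORT A =====
def taxMatchA (match_key request_value : String) : Bool :=
  if match_key = "" then false
  else if match_key = request_value then true
  else PySem.Str.startswith request_value (match_key ++ ".")

def taxAnyA (match_key : String) (request_values : List String) : Bool :=
  request_values.any (fun rv => taxMatchA match_key rv)

def matches_dimension_py (dim : List (String × List String)) (request_values : List String) : Bool :=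
  let any_values := (PySem.Dict.mk dim).getD "any" ([] : List String)
  if !any_values.isEmpty && !(any_values.any (fun mv => taxAnyA mv request_values)) then false
  else
    let all_values := (PySem.Dict.mk dim).getD "all" ([] : List String)
    if !all_values.isEmpty && !(all_values.all (fun mv => taxAnyA mv request_values)) then false
    else true

-- ===== PORT B =====
-- inner loop of Source B: add rv, then rv[:i] for every i with rv[i] == '.'
def addPrefixesB (s : PySem.Set String) (rv : String) : PySem.Set String :=
  (PySem.List.enumerate rv.toList).foldl
    (fun s p =>
      if p.2 = '.' then PySem.Set.add s (String.ofList (PySem.List.slice rv.toList none (some p.1)))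
      else s)
    (PySem.Set.add s rv)

def matchableSetB (request_values : List String) : PySem.Set String :=
  request_values.foldl addPrefixesB PySem.Set.empty

def okB (matchable : PySem.Set String) (mk : String) : Bool :=
  !(mk = "") && PySem.Set.contains matchable mk

def matches_dimension_py_alt (dim : List (String × List String)) (request_values : List String) : Bool :=
  let matchable := matchableSetB request_values
  let any_values := (PySem.Dict.mk dim).getD "any" ([] : List String)
  if !any_values.isEmpty && !(any_values.any (fun mv => okB matchable mv)) then false
  else
    let all_values := (PySem.Dict.mk dim).getD "all" ([] : List String)
    if !all_values.isEmpty && !(all_values.all (fun mv => okB matchable mv)) then false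
    else true

-- ===== PRECONDITION & SPEC =====
def Spec_matches_dimension_py (dim : List (String × List String)) (request_values : List String) (out : Bool) : Prop := out = matches_dimension_py_alt dim request_values
instance (dim : List (String × List String)) (request_values : List String) (out : Bool) : Decidable (Spec_matches_dimension_py dim request_values out) := by unfold Spec_matches_dimension_py; infer_instance

-- ===== CLAIM (what is proved, stated in full; the proofs are below) =====
def Claim_equal_matches_dimension_py : Prop := ∀ (dim : List (String × List String)) (request_values : List String), Dom_matches_dimension_py dim request_values → Spec_matches_dimension_py dim request_values (matches_dimension_py dim request_values)

-- ===== LEMMAS AND PROOFS =====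

-- membership in the inner add-if fold
theorem mem_foldl_addIf (x : String) (l : List (Int × Char)) (s : PySem.Set String)
    (g : Int × Char → String) :
    x ∈ l.foldl (fun s p => if p.2 = '.' then PySem.Set.add s (g p) else s) s ↔
      x ∈ s ∨ ∃ p ∈ l, p.2 = '.' ∧ x = g p := by
  induction l generalizing s with
  | nil => simp
  | cons p l ih =>
    simp only [List.foldl_cons, ih]
    by_cases h : p.2 = '.'
    · rw [if_pos h]
      simp only [PySem.Set.mem_add, List.exists_mem_cons_iff]
      tauto
    · rw [if_neg h]
      simp only [List.exists_mem_cons_iff]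
      tauto

theorem mem_addPrefixesB (x : String) (s : PySem.Set String) (rv : String) :
    x ∈ addPrefixesB s rv ↔ x ∈ s ∨ x = rv ∨
      ∃ p ∈ PySem.List.enumerate rv.toList, p.2 = '.' ∧
        x = String.ofList (PySem.List.slice rv.toList none (some p.1)) := by
  simp only [addPrefixesB, mem_foldl_addIf, PySem.Set.mem_add]
  tauto

theorem mem_matchableSetB (x : String) (rvs : List String) :
    x ∈ matchableSetB rvs ↔ ∃ rv ∈ rvs, x = rv ∨
      ∃ p ∈ PySem.List.enumerate rv.toList, p.2 = '.' ∧
        x = String.ofList (PySem.List.slice rv.toList none (some p.1)) := by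
  have go : ∀ (l : List String) (s : PySem.Set String),
      x ∈ l.foldl addPrefixesB s ↔ x ∈ s ∨ ∃ rv ∈ l, x = rv ∨
        ∃ p ∈ PySem.List.enumerate rv.toList, p.2 = '.' ∧
          x = String.ofList (PySem.List.slice rv.toList none (some p.1)) := by
    intro l
    induction l with
    | nil => simp
    | cons rv l ih =>
      intro s
      simp only [List.foldl_cons, ih, mem_addPrefixesB, List.exists_mem_cons_iff]
      exact or_assoc
  have := go rvs PySem.Set.empty
  simpa [matchableSetB, PySem.Set.empty] using this

-- dot-boundary prefix characterisation on char lists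
theorem dotPrefix_iff (ms cs : List Char) :
    (ms ++ ['.']) <+: cs ↔ ∃ k, ∃ h : k < cs.length, cs[k] = '.' ∧ ms = cs.take k := by
  constructor
  · rintro ⟨t, ht⟩
    refine ⟨ms.length, ?_, ?_, ?_⟩
    · subst ht; simp
    · subst ht; simp
    · subst ht; simp
  · rintro ⟨k, hk, hdot, rfl⟩
    refine ⟨cs.drop (k + 1), ?_⟩
    have h1 : cs.take k ++ ['.'] = cs.take (k + 1) := by
      rw [List.take_add_one]
      simp [List.getElem?_eq_getElem hk, hdot]
    rw [h1, List.take_append_drop]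

theorem taxMatchA_iff (mk rv : String) (hmk : mk ≠ "") :
    taxMatchA mk rv = true ↔ mk = rv ∨
      ∃ p ∈ PySem.List.enumerate rv.toList, p.2 = '.' ∧
        mk = String.ofList (PySem.List.slice rv.toList none (some p.1)) := by
  simp only [taxMatchA, if_neg hmk]
  by_cases heq : mk = rv
  · simp [heq]
  · simp only [eq_false heq, false_or, if_false]
    rw [PySem.Str.startswith_eq, PySem.Chars.startswith_iff]
    have htl : (mk ++ ".").toList = mk.toList ++ ['.'] := by
      simp [String.toList_append]
    rw [htl, dotPrefix_iff]
    constructor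
    · rintro ⟨k, hk, hdot, htake⟩
      refine ⟨((k : Int), rv.toList[k]), ?_, by simpa using hdot, ?_⟩
      · rw [PySem.List.mem_enumerate_iff]
        exact ⟨k, hk, by simp⟩
      · rw [PySem.List.slice_to_natCast]
        rw [← htake]
        simp
    · rintro ⟨p, hp, hdot, hval⟩
      rw [PySem.List.mem_enumerate_iff] at hp
      obtain ⟨k, hk, rfl⟩ := hp
      simp only [zero_add] at hdot hval ⊢
      refine ⟨k, hk, hdot, ?_⟩
      rw [PySem.List.slice_to_natCast] at hval
      simpa using congrArg String.toList hval

theorem taxAnyA_zero (rvs : List String) : taxAnyA "" rvs = false := by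
  simp [taxAnyA, taxMatchA]

theorem okB_eq (rvs : List String) (mk : String) :
    okB (matchableSetB rvs) mk = taxAnyA mk rvs := by
  by_cases hmk : mk = ""
  · subst hmk
    simp [okB, taxAnyA_zero]
  · simp only [okB, hmk, decide_false, Bool.not_false, Bool.true_and]
    rw [Bool.eq_iff_iff]
    rw [PySem.Set.contains_iff, mem_matchableSetB]
    simp only [taxAnyA, List.any_eq_true]
    constructor
    · rintro ⟨rv, hrv, h⟩
      exact ⟨rv, hrv, (taxMatchA_iff mk rv hmk).mpr h⟩
    · rintro ⟨rv, hrv, h⟩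
      exact ⟨rv, hrv, (taxMatchA_iff mk rv hmk).mp h⟩

-- ===== VERDICT (by name: the statement is the Claim_ definition above) =====
theorem matches_dimension_py_spec : Claim_equal_matches_dimension_py := by
  intro dim rvs _
  unfold Spec_matches_dimension_py matches_dimension_py matches_dimension_py_alt
  simp only [okB_eq]
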